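-- pv_equiv track=rewrite | github.com/ScarletStranger/PythonStart | Seminar6/main.py | friendly_numbers
-- ===== SOURCE A (Python) =====
-- def friendly_numbers(n):
--     if n <= 0:
--         return []
--     friends = []
--     for i in range(2, 10001):
--         while n % i == 0 and n > 0:
--             friends.append(i)
--             n //= i
--     return sorted(friends)[::-1]
-- ===== SOURCE B (Python) =====
-- def friendly_numbers(n):
--     # Trial division only up to sqrt(n) (capped at 10000), then the prime
--     # residual if it is <= 10000; factors come out ascending, reversed at the end.
--     if n <= 0:
--         return []
--     friends = []
--     i = 2
--     while i <= 10000 and i * i <= n: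
--         if n % i == 0:
--             friends.append(i)
--             n //= i
--         else:
--             i += 1
--     if 2 <= n <= 10000:
--         friends.append(n)
--     return friends[::-1]
-- ===== Notes on version B (the rewrite author's own statement) =====
-- stated objective: faster
-- what changed: A always scans every candidate divisor from two up to its fixed cap; B trial-divides only while the divisor squared is at most the remaining n (same cap) and then appends the prime residual if it lies within the cap, so the factor list comes out already ascending and is merely reversed instead of sorted.
import Mathlib
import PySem

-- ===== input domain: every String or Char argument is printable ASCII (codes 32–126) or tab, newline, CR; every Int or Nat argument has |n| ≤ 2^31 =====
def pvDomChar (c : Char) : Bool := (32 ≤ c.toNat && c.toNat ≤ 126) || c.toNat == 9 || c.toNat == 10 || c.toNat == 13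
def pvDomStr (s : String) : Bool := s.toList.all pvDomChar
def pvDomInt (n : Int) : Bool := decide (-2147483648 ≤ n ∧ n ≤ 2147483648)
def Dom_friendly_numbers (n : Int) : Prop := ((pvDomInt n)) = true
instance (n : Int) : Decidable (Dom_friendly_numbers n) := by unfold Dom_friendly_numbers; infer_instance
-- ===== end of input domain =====

-- B replaces A's fixed scan of all 9999 candidate divisors by trial division only while
-- i*i <= n (still capped at 10000) plus the prime residual if it is <= 10000.

-- cited by the termination proofs of the ports below
lemma pv_floordiv_lt (n i : Int) (hn : 0 < n) (hi : 2 ≤ i) :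
    0 ≤ PySem.Int.floordiv n i ∧ PySem.Int.floordiv n i < n := by
  rw [PySem.Int.floordiv_eq_ediv_of_pos (by omega : (0:Int) < i)]
  have hq0 : 0 ≤ n / i := Int.ediv_nonneg (by omega) (by omega)
  have hmul : i * (n / i) + n % i = n := Int.ediv_add_emod n i
  have hmod : 0 ≤ n % i := Int.emod_nonneg n (by omega)
  have h2q : 2 * (n / i) ≤ i * (n / i) := by nlinarith
  have h3 : 2 * (n / i) ≤ n := by omega
  exact ⟨hq0, by omega⟩

-- ===== PORT A =====
-- inner 'while n % i == 0 and n > 0' loop ('2 ≤ i' is a totality guard only: every i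
-- the caller passes comes from range(2, 10001), so it changes nothing)
def fnWhile (i n : Int) (fr : List Int) : Int × List Int :=
  if h : PySem.Int.mod n i = 0 ∧ 0 < n ∧ 2 ≤ i then
    fnWhile i (PySem.Int.floordiv n i) (fr ++ [i])
  else (n, fr)
termination_by n.toNat
decreasing_by
  have := pv_floordiv_lt n i h.2.1 h.2.2
  omega

def friendly_numbers (n : Int) : List Int :=
  if n ≤ 0 then []
  else
    let st := (PySem.List.pyRange 2 10001 1).foldl (fun st i => fnWhile i st.1 st.2) (n, [])
    -- sorted(friends)[::-1]
    ((PySem.List.slice? (PySem.List.sorted st.2 (fun x => x) false) none none (-1)).getD [])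

-- ===== PORT B =====
-- 'while i <= 10000 and i * i <= n: …' ('2 ≤ i' is a totality guard only: i starts at 2
-- and only ever increases)
def fnAlt (i n : Int) (fr : List Int) : Int × List Int :=
  if h : i ≤ 10000 ∧ i * i ≤ n ∧ 2 ≤ i then
    if PySem.Int.mod n i = 0 then fnAlt i (PySem.Int.floordiv n i) (fr ++ [i])
    else fnAlt (i + 1) n fr
  else (n, fr)
termination_by (n.toNat + (10001 - i).toNat)
decreasing_by
  · have := pv_floordiv_lt n i (by nlinarith [h.1, h.2.1, h.2.2] : 0 < n) h.2.2
    omega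
  · omega

def friendly_numbers_alt (n : Int) : List Int :=
  if n ≤ 0 then []
  else
    let st := fnAlt 2 n []
    -- friends[::-1] is List.reverse
    (if 2 ≤ st.1 ∧ st.1 ≤ 10000 then st.2 ++ [st.1] else st.2).reverse

-- ===== PRECONDITION & SPEC =====
def Spec_friendly_numbers (n : Int) (out : List Int) : Prop := out = friendly_numbers_alt n
instance (n : Int) (out : List Int) : Decidable (Spec_friendly_numbers n out) := by unfold Spec_friendly_numbers; infer_instance

-- ===== CLAIM (what is proved, stated in full; the proofs are below) =====
def Claim_equal_friendly_numbers : Prop := ∀ (n : Int), Dom_friendly_numbers n → Spec_friendly_numbers n (friendly_numbers n)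

-- ===== LEMMAS AND PROOFS =====

-- Reference factor stream: divisors i, i+1, …, 10000 divided out of n in ascending order.
def facs (i n : Int) : List Int :=
  if h : 2 ≤ i ∧ i ≤ 10000 ∧ 2 ≤ n then
    if PySem.Int.mod n i = 0 then i :: facs i (PySem.Int.floordiv n i) else facs (i + 1) n
  else []
termination_by (n.toNat + (10001 - i).toNat)
decreasing_by
  · have := pv_floordiv_lt n i (by omega) h.1
    omega
  · omega

-- n has no divisor in [2, i)
def NoDiv (i n : Int) : Prop := ∀ d : Int, 2 ≤ d → d < i → ¬ d ∣ n

lemma dvd_step (i n : Int) (hi : 2 ≤ i) (hn : 0 < n) (hd : i ∣ n) :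
    0 < PySem.Int.floordiv n i ∧ PySem.Int.floordiv n i < n ∧
      ∀ d : Int, d ∣ PySem.Int.floordiv n i → d ∣ n := by
  rw [PySem.Int.floordiv_eq_ediv_of_pos (by omega : (0:Int) < i)]
  obtain ⟨c, rfl⟩ := hd
  have hc : 0 < c := by by_contra h; push_neg at h; nlinarith
  rw [Int.mul_ediv_cancel_left _ (by omega : i ≠ 0)]
  exact ⟨hc, by nlinarith, fun d hdc => hdc.mul_left i⟩

lemma fnWhile_acc : ∀ (k : Nat) (i n : Int), n.toNat ≤ k → ∀ fr : List Int,
    fnWhile i n fr = ((fnWhile i n []).1, fr ++ (fnWhile i n []).2) := by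
  intro k
  induction k with
  | zero =>
    intro i n hk fr
    have hc : ¬ (PySem.Int.mod n i = 0 ∧ 0 < n ∧ 2 ≤ i) := by rintro ⟨_, hn, _⟩; omega
    rw [fnWhile, dif_neg hc, fnWhile, dif_neg hc]
    simp
  | succ k ih =>
    intro i n hk fr
    rw [fnWhile]
    conv_rhs => rw [fnWhile]
    by_cases h : PySem.Int.mod n i = 0 ∧ 0 < n ∧ 2 ≤ i
    · simp only [dif_pos h, List.nil_append]
      obtain ⟨hm, hn, hi⟩ := h
      have hdvd : i ∣ n := (PySem.Int.mod_eq_zero_iff_dvd n i).mp hm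
      obtain ⟨hpos, hlt, -⟩ := dvd_step i n hi hn hdvd
      have hk' : (PySem.Int.floordiv n i).toNat ≤ k := by omega
      rw [ih i _ hk' (fr ++ [i]), ih i _ hk' [i]]
      simp
    · simp [dif_neg h]

lemma fnAlt_acc : ∀ (k : Nat) (i n : Int), n.toNat + (10001 - i).toNat ≤ k → ∀ fr : List Int,
    fnAlt i n fr = ((fnAlt i n []).1, fr ++ (fnAlt i n []).2) := by
  intro k
  induction k with
  | zero =>
    intro i n hk fr
    have hc : ¬ (i ≤ 10000 ∧ i * i ≤ n ∧ 2 ≤ i) := by rintro ⟨hle, hsq, hi⟩; omega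
    rw [fnAlt, dif_neg hc, fnAlt, dif_neg hc]
    simp
  | succ k ih =>
    intro i n hk fr
    rw [fnAlt]
    conv_rhs => rw [fnAlt]
    by_cases h : i ≤ 10000 ∧ i * i ≤ n ∧ 2 ≤ i
    · obtain ⟨hle, hsq, hi⟩ := h
      have hn : 0 < n := by nlinarith
      simp only [dif_pos (⟨hle, hsq, hi⟩ : i ≤ 10000 ∧ i * i ≤ n ∧ 2 ≤ i), List.nil_append]
      by_cases hm : PySem.Int.mod n i = 0
      · have hdvd : i ∣ n := (PySem.Int.mod_eq_zero_iff_dvd n i).mp hm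
        obtain ⟨hpos, hlt, -⟩ := dvd_step i n hi hn hdvd
        have hk' : (PySem.Int.floordiv n i).toNat + (10001 - i).toNat ≤ k := by omega
        simp only [if_pos hm]
        rw [ih i _ hk' (fr ++ [i]), ih i _ hk' [i]]
        simp
      · have hk' : n.toNat + (10001 - (i + 1)).toNat ≤ k := by omega
        simp only [if_neg hm]
        rw [ih (i + 1) n hk' fr]
    · simp [dif_neg h]

-- one run of A's inner while loop realises a prefix of the factor stream
lemma fnWhile_facs : ∀ (k : Nat) (i n : Int), n.toNat ≤ k → 2 ≤ i → i ≤ 10000 → 0 < n →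
    facs i n = (fnWhile i n []).2 ++ facs (i + 1) (fnWhile i n []).1 ∧
    0 < (fnWhile i n []).1 ∧
    (∀ d : Int, d ∣ (fnWhile i n []).1 → d ∣ n) ∧
    ¬ i ∣ (fnWhile i n []).1 := by
  intro k
  induction k with
  | zero => intro i n hk hi hle hn; omega
  | succ k ih =>
    intro i n hk hi hle hn
    rw [fnWhile]
    by_cases hm : PySem.Int.mod n i = 0
    · have hdvd : i ∣ n := (PySem.Int.mod_eq_zero_iff_dvd n i).mp hm
      obtain ⟨hpos, hlt, hdd⟩ := dvd_step i n hi hn hdvd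
      simp only [dif_pos (⟨hm, hn, hi⟩ : PySem.Int.mod n i = 0 ∧ 0 < n ∧ 2 ≤ i), List.nil_append]
      have hk' : (PySem.Int.floordiv n i).toNat ≤ k := by omega
      obtain ⟨h1, h2, h3, h4⟩ := ih i (PySem.Int.floordiv n i) hk' hi hle hpos
      rw [fnWhile_acc k i _ hk' [i]]
      refine ⟨?_, h2, fun d hd => hdd d (h3 d hd), h4⟩
      have hge : 2 ≤ n := by
        have := Int.le_of_dvd hn hdvd; omega
      rw [facs, dif_pos ⟨hi, hle, hge⟩, if_pos hm]
      simp only [List.cons_append]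
      rw [h1]
      simp
    · have hc : ¬ (PySem.Int.mod n i = 0 ∧ 0 < n ∧ 2 ≤ i) := by
        rintro ⟨h, _, _⟩; exact hm h
      simp only [dif_neg hc]
      have hnd : ¬ i ∣ n := fun hd => hm ((PySem.Int.mod_eq_zero_iff_dvd n i).mpr hd)
      refine ⟨?_, hn, fun d hd => hd, hnd⟩
      by_cases hn2 : 2 ≤ n
      · rw [facs, dif_pos ⟨hi, hle, hn2⟩, if_neg hm]; simp
      · have h1 : n = 1 := by omega
        subst h1
        rw [facs, dif_neg (by rintro ⟨-, -, hx⟩; omega : ¬ (2 ≤ i ∧ i ≤ 10000 ∧ (2:Int) ≤ 1)),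
          facs, dif_neg (by rintro ⟨-, -, hx⟩; omega : ¬ (2 ≤ i + 1 ∧ i + 1 ≤ 10000 ∧ (2:Int) ≤ 1))]
        simp

-- A's outer for-loop over range(2, 10001) collects exactly the factor stream
lemma foldA_eq : ∀ (j : Nat) (i n : Int) (fr : List Int), (10001 - i).toNat ≤ j → 2 ≤ i → 0 < n →
    ((PySem.List.pyRange i 10001 1).foldl (fun st m => fnWhile m st.1 st.2) (n, fr)).2 = fr ++ facs i n := by
  intro j
  induction j with
  | zero =>
    intro i n fr hj hi hn
    have hge : (10001:Int) ≤ i := by omega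
    rw [PySem.List.pyRange_one_eq_nil hge, facs,
      dif_neg (by rintro ⟨-, h, -⟩; omega : ¬ (2 ≤ i ∧ i ≤ 10000 ∧ 2 ≤ n))]
    simp
  | succ j ih =>
    intro i n fr hj hi hn
    by_cases hle : i ≤ 10000
    · rw [PySem.List.pyRange_one_cons (by omega : i < 10001)]
      simp only [List.foldl_cons]
      obtain ⟨h1, h2, -, -⟩ := fnWhile_facs n.toNat i n le_rfl hi hle hn
      rw [fnWhile_acc n.toNat i n le_rfl fr]
      rw [ih (i + 1) _ _ (by omega) (by omega) h2]
      rw [h1, List.append_assoc]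
    · have hge : (10001:Int) ≤ i := by omega
      rw [PySem.List.pyRange_one_eq_nil hge, facs,
        dif_neg (by rintro ⟨-, h, -⟩; omega : ¬ (2 ≤ i ∧ i ≤ 10000 ∧ 2 ≤ n))]
      simp

-- if n ≥ 2 has no nontrivial divisor, the remaining stream is [n] (or [] past the cap)
lemma facs_only : ∀ (j : Nat) (i n : Int), (10001 - i).toNat ≤ j → 2 ≤ i → i ≤ n → 2 ≤ n →
    (∀ d : Int, 2 ≤ d → d ∣ n → d = n) →
    facs i n = if n ≤ 10000 then [n] else [] := by
  intro j
  induction j with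
  | zero =>
    intro i n hj hi hin hn hd
    rw [facs, dif_neg (by rintro ⟨-, h, -⟩; omega : ¬ (2 ≤ i ∧ i ≤ 10000 ∧ 2 ≤ n)),
      if_neg (by omega : ¬ n ≤ 10000)]
  | succ j ih =>
    intro i n hj hi hin hn hd
    by_cases hle : i ≤ 10000
    · rw [facs, dif_pos ⟨hi, hle, hn⟩]
      by_cases hm : PySem.Int.mod n i = 0
      · have hdvd : i ∣ n := (PySem.Int.mod_eq_zero_iff_dvd n i).mp hm
        have hin' : i = n := hd i hi hdvd
        subst hin'
        rw [if_pos hm]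
        rw [PySem.Int.floordiv_eq_ediv_of_pos (by omega : (0:Int) < i),
          Int.ediv_self (by omega : i ≠ 0)]
        rw [facs, dif_neg (by rintro ⟨-, -, h⟩; omega : ¬ (2 ≤ i ∧ i ≤ 10000 ∧ (2:Int) ≤ 1)),
          if_pos hle]
      · have hne : i ≠ n := by
          intro hEq
          exact hm ((PySem.Int.mod_eq_zero_iff_dvd n i).mpr (hEq ▸ dvd_rfl))
        rw [if_neg hm]
        exact ih (i + 1) n (by omega) (by omega) (by omega) hn hd
    · rw [facs, dif_neg (by rintro ⟨-, h, -⟩; omega : ¬ (2 ≤ i ∧ i ≤ 10000 ∧ 2 ≤ n)),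
        if_neg (by omega : ¬ n ≤ 10000)]

lemma nodiv_only (i n : Int) (hi : 2 ≤ i) (h : NoDiv i n) (hn : 2 ≤ n) (hsq : n < i * i) :
    ∀ d : Int, 2 ≤ d → d ∣ n → d = n := by
  intro d hd hdvd
  by_contra hne
  obtain ⟨c, hc⟩ := hdvd
  have hcpos : 0 < c := by by_contra hcn; push_neg at hcn; nlinarith
  have hcdvd : c ∣ n := ⟨d, by rw [hc]; ring⟩
  have hc2 : 2 ≤ c := by
    rcases (by omega : c = 1 ∨ 2 ≤ c) with h1 | h2
    · exfalso; apply hne; rw [hc, h1, mul_one]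
    · exact h2
  have hdi : i ≤ d := by
    by_contra h'; push_neg at h'
    exact h d hd h' ⟨c, hc⟩
  have hci : i ≤ c := by
    by_contra h'; push_neg at h'
    exact h c hc2 h' hcdvd
  have hmul : i * i ≤ d * c := mul_le_mul hdi hci (by omega) (by omega)
  rw [hc] at hsq
  linarith

lemma nodiv_le (i n : Int) (h : NoDiv i n) (hn : 2 ≤ n) : i ≤ n := by
  by_contra h'; push_neg at h'
  exact h n hn h' dvd_rfl

-- B's loop plus its residual append realise the whole factor stream
lemma fnAlt_facs : ∀ (k : Nat) (i n : Int), n.toNat + (10001 - i).toNat ≤ k → 2 ≤ i → 0 < n →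
    NoDiv i n →
    (if 2 ≤ (fnAlt i n []).1 ∧ (fnAlt i n []).1 ≤ 10000
      then (fnAlt i n []).2 ++ [(fnAlt i n []).1] else (fnAlt i n []).2) = facs i n := by
  intro k
  induction k with
  | zero => intro i n hk hi hn hnd; omega
  | succ k ih =>
    intro i n hk hi hn hnd
    rw [fnAlt]
    by_cases h : i ≤ 10000 ∧ i * i ≤ n ∧ 2 ≤ i
    · obtain ⟨hle, hsq, -⟩ := h
      have hn2 : 2 ≤ n := by nlinarith
      simp only [dif_pos (⟨hle, hsq, hi⟩ : i ≤ 10000 ∧ i * i ≤ n ∧ 2 ≤ i), List.nil_append]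
      by_cases hm : PySem.Int.mod n i = 0
      · have hdvd : i ∣ n := (PySem.Int.mod_eq_zero_iff_dvd n i).mp hm
        obtain ⟨hpos, hlt, hdd⟩ := dvd_step i n hi hn hdvd
        have hk' : (PySem.Int.floordiv n i).toNat + (10001 - i).toNat ≤ k := by omega
        simp only [if_pos hm]
        rw [fnAlt_acc k i _ hk' [i]]
        have hnd' : NoDiv i (PySem.Int.floordiv n i) := fun d h2 hlt' hd =>
          hnd d h2 hlt' (hdd d hd)
        have hih := ih i (PySem.Int.floordiv n i) hk' hi hpos hnd'
        rw [facs, dif_pos ⟨hi, hle, hn2⟩, if_pos hm]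
        simp only [List.cons_append, List.nil_append]
        rw [← hih]
        split_ifs with hc <;> simp
      · have hk' : n.toNat + (10001 - (i + 1)).toNat ≤ k := by omega
        have hnd' : NoDiv (i + 1) n := by
          intro d h2 hlt' hd
          rcases (by omega : d < i ∨ d = i) with h' | rfl
          · exact hnd d h2 h' hd
          · exact hm ((PySem.Int.mod_eq_zero_iff_dvd n d).mpr hd)
        simp only [if_neg hm]
        rw [ih (i + 1) n hk' (by omega) hn hnd']
        conv_rhs => rw [facs]
        rw [dif_pos (⟨hi, hle, hn2⟩ : 2 ≤ i ∧ i ≤ 10000 ∧ 2 ≤ n), if_neg hm]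
    · simp only [dif_neg h]
      by_cases hn2 : 2 ≤ n
      · by_cases hsq : n < i * i
        · have honly := nodiv_only i n hi hnd hn2 hsq
          have hin : i ≤ n := nodiv_le i n hnd hn2
          rw [facs_only (10001 - i).toNat i n le_rfl hi hin hn2 honly]
          by_cases hc : n ≤ 10000
          · rw [if_pos hc, if_pos ⟨hn2, hc⟩]; simp
          · rw [if_neg hc, if_neg (by rintro ⟨-, h''⟩; omega)]
        · push_neg at hsq
          have hgt : 10000 < i := by
            by_contra h'; push_neg at h'
            exact h ⟨h', hsq, hi⟩
          have hbig : 10000 < n := by nlinarith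
          rw [facs, dif_neg (by rintro ⟨-, h'', -⟩; omega : ¬ (2 ≤ i ∧ i ≤ 10000 ∧ 2 ≤ n)),
            if_neg (by rintro ⟨-, h''⟩; omega)]
      · have h1 : n = 1 := by omega
        subst h1
        rw [facs, dif_neg (by rintro ⟨-, -, h''⟩; omega : ¬ (2 ≤ i ∧ i ≤ 10000 ∧ (2:Int) ≤ 1)),
          if_neg (by rintro ⟨h'', -⟩; omega)]

-- the factor stream is nondecreasing (with all elements ≥ i)
lemma facs_sorted : ∀ (k : Nat) (i n : Int), n.toNat + (10001 - i).toNat ≤ k →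
    (∀ x ∈ facs i n, i ≤ x) ∧ (facs i n).Pairwise (· ≤ ·) := by
  intro k
  induction k with
  | zero =>
    intro i n hk
    rw [facs]
    have hc : ¬ (2 ≤ i ∧ i ≤ 10000 ∧ 2 ≤ n) := by rintro ⟨h1, h2, h3⟩; omega
    simp [dif_neg hc]
  | succ k ih
 =>
    intro i n hk
    rw [facs]
    by_cases h : 2 ≤ i ∧ i ≤ 10000 ∧ 2 ≤ n
    · obtain ⟨hi, hle, hn⟩ := h
      simp only [dif_pos (⟨hi, hle, hn⟩ : 2 ≤ i ∧ i ≤ 10000 ∧ 2 ≤ n)]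
      by_cases hm : PySem.Int.mod n i = 0
      · obtain ⟨hq, hlt⟩ := pv_floordiv_lt n i (by omega) hi
        have hk' : (PySem.Int.floordiv n i).toNat + (10001 - i).toNat ≤ k := by omega
        obtain ⟨hb, hp⟩ := ih i (PySem.Int.floordiv n i) hk'
        rw [if_pos hm]
        refine ⟨?_, ?_⟩
        · intro x hx
          rcases List.mem_cons.mp hx with rfl | hx'
          · exact le_rfl
          · exact hb x hx'
        · exact List.pairwise_cons.mpr ⟨fun x hx => hb x hx, hp⟩
      · have hk' : n.toNat + (10001 - (i + 1)).toNat ≤ k := by omega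
        obtain ⟨hb, hp⟩ := ih (i + 1) n hk'
        rw [if_neg hm]
        exact ⟨fun x hx => le_trans (by omega) (hb x hx), hp⟩
    · simp [dif_neg h]

-- ===== VERDICT (by name: the statement is the Claim_ definition above) =====
theorem friendly_numbers_spec : Claim_equal_friendly_numbers := by
  unfold Claim_equal_friendly_numbers
  intro n _
  unfold Spec_friendly_numbers
  simp only [friendly_numbers, friendly_numbers_alt]
  by_cases hn : n ≤ 0
  · rw [if_pos hn, if_pos hn]
  · push_neg at hn
    rw [if_neg (by omega : ¬ n ≤ 0), if_neg (by omega : ¬ n ≤ 0)]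
    have hA := foldA_eq 9999 2 n [] (by norm_num) (by norm_num) hn
    have hB := fnAlt_facs (n.toNat + 9999) 2 n (by norm_num) (by norm_num) hn
      (by intro d h2 hlt hd; omega)
    rw [hA, hB]
    simp only [List.nil_append]
    obtain ⟨-, hp⟩ := facs_sorted (n.toNat + 9999) 2 n (by norm_num)
    rw [PySem.List.slice?_none_none_neg_one]
    have hs := PySem.List.sorted_eq_self_of_pairwise (facs 2 n) (fun x => x) hp
    simp only [Option.getD_some]
    rw [hs]
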